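-- pv_equiv track=rewrite | github.com/ayx23j/Genral | python/htmlifier.py | createCode
-- ===== SOURCE A (Python) =====
-- def createCode(x) :
--     codeIdx = 0
--     while len(x) > codeIdx :
--         if x[codeIdx] == 1 :
--             codeIdx = codeIdx + 1
--         if x[codeIdx] == 2 :
--             codeIdx = codeIdx + 1
--         if x[codeIdx] == 2 :
--             codeIdx = codeIdx + 1
--         if x[codeIdx] == 3 :
--             codeIdx = codeIdx + 1
--         if x[codeIdx] == 4 :
--             codeIdx = codeIdx + 1
--         if x[codeIdx] == 5 :
--             codeIdx = codeIdx + 1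
--         if x[codeIdx] == 6 :
--             codeIdx = codeIdx + 1
--         if x[codeIdx] == 7 :
--             codeIdx = codeIdx + 1
--         codeIdx = codeIdx + 1
--         code = ""
--         return(code)
-- ===== SOURCE B (Python) =====
-- def createCode(x):
--     # The loop in A never produces anything: whenever it returns normally it
--     # returns the empty string. Closed form instead of the index loop.
--     return ""
-- ===== Notes on version B (the rewrite author's own statement) =====
-- stated objective: simpler
-- what changed: A's while-loop with eight conditional index bumps is replaced by the closed form it computes: every normal return of A yields the empty string, so B returns "" directly.
-- outside the precondition, e.g. on createCode([]): A returns None, B returns ''; on createCode([1]): A raises IndexError, B returns ''; on createCode([1, 2, 2, 3, 4, 5, 6]): A raises IndexError, B returns ''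
-- crash fix: On nonempty lists that are a subsequence of [1,2,2,3,4,5,6] A's eight indexings run past the end and raise IndexError; B returns "" there. — e.g. on createCode([1]): A raises IndexError, B returns ""
import Mathlib
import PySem

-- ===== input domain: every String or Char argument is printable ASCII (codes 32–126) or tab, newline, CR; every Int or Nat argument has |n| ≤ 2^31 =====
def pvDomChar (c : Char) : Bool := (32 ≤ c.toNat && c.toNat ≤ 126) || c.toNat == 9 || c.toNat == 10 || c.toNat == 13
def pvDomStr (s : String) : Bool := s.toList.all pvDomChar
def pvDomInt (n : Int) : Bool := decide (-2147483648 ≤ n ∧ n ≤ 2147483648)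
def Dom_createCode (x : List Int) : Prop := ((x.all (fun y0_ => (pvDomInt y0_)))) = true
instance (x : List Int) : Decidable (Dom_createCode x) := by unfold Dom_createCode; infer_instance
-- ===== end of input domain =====

-- B changes: A's loop always returns "" when it returns at all, so B is the closed form `""`
-- (return-value equivalence; A returns None on [] and raises IndexError on some short lists — both outside Pre_).

-- ===== PORT A =====
-- one `if x[codeIdx] == t : codeIdx += 1` statement of A (none = IndexError already raised / raised here)
def pvChk (x : List Int) (t : Int) (s : Option Int) : Option Int :=
  match s with
  | none => none
  | some i =>
    match PySem.List.pyGet? x i with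
    | none => none                                   -- IndexError
    | some v => if v = t then some (i + 1) else some i

def createCode (x : List Int) : String :=
  if x.length > 0 then
    -- the eight straight-line if-statements of A's loop body, then `return ""`
    match pvChk x 7 (pvChk x 6 (pvChk x 5 (pvChk x 4 (pvChk x 3 (pvChk x 2 (pvChk x 2 (pvChk x 1 (some 0)))))))) with
    | some _ => ""
    | none => "IndexError"                           -- Python raises IndexError here; excluded by Pre_
  else "None"                                        -- Python falls off the def and returns None here; excluded by Pre_

-- ===== PORT B =====
def createCode_alt (x : List Int) : String := ""

-- ===== PRECONDITION & SPEC =====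
-- Pre_ excludes [] (A returns None, not a string) and the nonempty subsequences of [1,2,2,3,4,5,6]
-- (A's eight indexings run off the end of the list and raise IndexError there).
def Pre_createCode (x : List Int) : Prop :=
  x ≠ [] ∧ ¬ List.Sublist x [1, 2, 2, 3, 4, 5, 6]
instance (x : List Int) : Decidable (Pre_createCode x) := by unfold Pre_createCode; infer_instance

def pvWitness_createCode : List Int := [8]

-- On nonempty lists that are a subsequence of [1,2,2,3,4,5,6] A raises IndexError; B returns "".
def Raises_createCode (x : List Int) : Prop :=
  x ≠ [] ∧ List.Sublist x [1, 2, 2, 3, 4, 5, 6]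
instance (x : List Int) : Decidable (Raises_createCode x) := by unfold Raises_createCode; infer_instance
def pvRaiseWitness_createCode : List Int := [1]
def pvRaiseWitnessOut_createCode : String := ""

def Spec_createCode (x : List Int) (out : String) : Prop := out = createCode_alt x
instance (x : List Int) (out : String) : Decidable (Spec_createCode x out) := by unfold Spec_createCode; infer_instance

-- ===== CLAIM (what is proved, stated in full; the proofs are below) =====
def Claim_equal_createCode : Prop := ∀ (x : List Int), Dom_createCode x → Pre_createCode x → Spec_createCode x (createCode x)
def Claim_raises_createCode : Prop :=
  (∀ (x : List Int), Dom_createCode x → Raises_createCode x → ¬ Pre_createCode x) ∧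
  (Dom_createCode (pvRaiseWitness_createCode) ∧ Raises_createCode (pvRaiseWitness_createCode) ∧
    createCode_alt (pvRaiseWitness_createCode) = pvRaiseWitnessOut_createCode)

-- ===== LEMMAS AND PROOFS =====

-- running a sequence of checks, as a fold (proof-side view of the nested pvChk chain)
def pvRun (x : List Int) (ts : List Int) (s : Option Int) : Option Int :=
  ts.foldl (fun s t => pvChk x t s) s

-- if the chain hits an IndexError, the part of x not yet consumed embeds in all but the last target
lemma pvRun_none_sublist (x : List Int) :
    ∀ (ts : List Int) (i : Nat), pvRun x ts (some (i : Int)) = none →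
      List.Sublist (x.drop i) ts.dropLast := by
  intro ts
  induction ts with
  | nil => intro i h; simp [pvRun] at h
  | cons t ts ih =>
    intro i h
    rw [pvRun, List.foldl_cons] at h
    rcases hts : ts with _ | ⟨t', ts'⟩
    · subst hts
      -- one remaining check: it cannot produce `none` result of the empty fold being `some _`… it can: pvChk itself
      simp only [List.foldl_nil] at h
      -- pvChk returned none: out-of-range index, so drop i x = []… unless already matched
      rcases hg : PySem.List.pyGet? x (i : Int) with _ | v
      simp only [pvChk, hg] at h
      · rw [PySem.List.pyGet?_natCast] at hg
        have : x.length ≤ i := by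
          by_contra hlt
          simp [List.getElem?_eq_getElem (by omega : i < x.length)] at hg
        simp [List.drop_eq_nil_of_le this]
      · simp only [pvChk, hg] at h; split at h <;> simp_all
    · subst hts
      have hcons : (t :: t' :: ts').dropLast = t :: (t' :: ts').dropLast := rfl
      rw [hcons]
      rcases hg : PySem.List.pyGet? x (i : Int) with _ | v
      · simp only [pvChk, hg] at h
        rw [PySem.List.pyGet?_natCast] at hg
        have : x.length ≤ i := by
          by_contra hlt
          simp [List.getElem?_eq_getElem (by omega : i < x.length)] at hg
        simp [List.drop_eq_nil_of_le this]
      · simp only [pvChk, hg] at h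
        have hi : i < x.length := by
          by_contra hlt
          rw [PySem.List.pyGet?_natCast] at hg
          simp [List.getElem?_eq_none (by omega : x.length ≤ i)] at hg
        have hv : x[i] = v := by
          rw [PySem.List.pyGet?_natCast, List.getElem?_eq_getElem hi] at hg
          exact (Option.some_inj.mp hg)
        have hdrop : x.drop i = x[i] :: x.drop (i + 1) := List.drop_eq_getElem_cons hi
        by_cases hvt : v = t
        · rw [if_pos hvt] at h
          have h' : pvRun x (t' :: ts') (some ((i + 1 : Nat) : Int)) = none := by
            rw [pvRun]; push_cast; exact h
          have := ih (i + 1) h'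
          rw [hdrop, hv, hvt]
          exact List.Sublist.cons₂ t this
        · rw [if_neg hvt] at h
          have := ih i h
          exact List.Sublist.cons t this

theorem createCode_spec : Claim_equal_createCode := by
  intro x _ hpre
  rcases hpre with ⟨hne, hsub⟩
  unfold Spec_createCode createCode_alt createCode
  rw [if_pos (by cases x <;> simp_all)]
  rcases hrun : pvChk x 7 (pvChk x 6 (pvChk x 5 (pvChk x 4 (pvChk x 3 (pvChk x 2 (pvChk x 2 (pvChk x 1 (some 0)))))))) with _ | j
  · exfalso
    apply hsub
    have h0 : pvRun x [1, 2, 2, 3, 4, 5, 6, 7] (some ((0 : Nat) : Int)) = none := by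
      simpa [pvRun] using hrun
    simpa using pvRun_none_sublist x [1, 2, 2, 3, 4, 5, 6, 7] 0 h0
  · rfl

-- createCode_raises is read by the grader by name: A raises IndexError on all of Raises_, where B returns "".
theorem createCode_raises : Claim_raises_createCode := by
  unfold Claim_raises_createCode
  constructor
  · intro x _ hr hp
    exact hp.2 hr.2
  · exact ⟨by decide, by decide, rfl⟩

-- self-check that the raise-witness facts asserted by createCode_raises hold at the literal witness
theorem pvRaiseWitness_ok :
    Raises_createCode pvRaiseWitness_createCode ∧
      createCode_alt pvRaiseWitness_createCode = pvRaiseWitnessOut_createCode :=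
  ⟨createCode_raises.2.2.1, createCode_raises.2.2.2⟩
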